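-- pv_equiv track=rewrite | github.com/Jaenne/mastermind | fonctions_mastemind.py | comparaison_couleurs
-- ===== SOURCE A (Python) =====
-- def comparaison_couleurs(combinaison, code, compteur_d_essais):
-- 	"""
-- 	Function which compares the code and the combination of the player
-- 	by looking for color matches.
-- 	- save the combination;
-- 	For each letter in combination :
-- 		if the combination letter has more occurrences than the same
-- 		letter in the code:
-- 			- Replace excess occurrences in combination with an "x";
-- 	- compare the new combination with the code;
-- 	- increments the test counter by 1
-- 	- returns in the main function:
-- 	- the number of good colors;
-- 	- the test counter;
-- 	- saving the combination.
--
-- 	"""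
-- 	bonnes_couleurs = 0
-- 	sauvegarde_combinaison = []
-- 	sauvegarde_combinaison.extend(combinaison)
-- 	for i, element in enumerate(combinaison):
-- 		for j, letter in enumerate(code):
-- 			if combinaison.count(element) > code.count(letter):
-- 				if element == letter:
-- 					del combinaison[i]
-- 					combinaison.insert(i, "x")
-- 		if combinaison[i] in code:
-- 			bonnes_couleurs += 1
-- 	compteur_d_essais += 1
-- 	return bonnes_couleurs, compteur_d_essais, sauvegarde_combinaison
-- ===== SOURCE B (Python) =====
-- def comparaison_couleurs(combinaison, code, compteur_d_essais):
--     # One counting pass over each list, then a sum of per-color minima.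
--     # (A mutates `combinaison` in place; B does not -- the returned values agree.)
--     guess_counts = {}
--     for c in combinaison:
--         guess_counts[c] = guess_counts.get(c, 0) + 1
--     code_counts = {}
--     for c in code:
--         code_counts[c] = code_counts.get(c, 0) + 1
--     bonnes_couleurs = 0
--     for c, n in code_counts.items():
--         bonnes_couleurs += min(n, guess_counts.get(c, 0))
--     return bonnes_couleurs, compteur_d_essais + 1, list(combinaison)
-- ===== Notes on version B (the rewrite author's own statement) =====
-- stated objective: faster
-- what changed: B replaces A's in-place sentinel-mutation scan with repeated list.count calls inside nested loops by two single counting passes building per-color tables and one sum of per-color minima; B does not mutate its argument.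
-- intended difference: When the sentinel string "x" occurs in code and some color occurs more often in combinaison than in code, A's excess slots are overwritten with "x" which then itself matches the code, so A returns the uncapped count of guess elements whose color is in code; B returns the intended Mastermind count, the sum over colors of min(guess count, code count). — e.g. on comparaison_couleurs(["r", "r"], ["r", "x"], 0): A returns (2, 1, ["r", "r"]), B returns (1, 1, ["r", "r"])
import Mathlib
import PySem

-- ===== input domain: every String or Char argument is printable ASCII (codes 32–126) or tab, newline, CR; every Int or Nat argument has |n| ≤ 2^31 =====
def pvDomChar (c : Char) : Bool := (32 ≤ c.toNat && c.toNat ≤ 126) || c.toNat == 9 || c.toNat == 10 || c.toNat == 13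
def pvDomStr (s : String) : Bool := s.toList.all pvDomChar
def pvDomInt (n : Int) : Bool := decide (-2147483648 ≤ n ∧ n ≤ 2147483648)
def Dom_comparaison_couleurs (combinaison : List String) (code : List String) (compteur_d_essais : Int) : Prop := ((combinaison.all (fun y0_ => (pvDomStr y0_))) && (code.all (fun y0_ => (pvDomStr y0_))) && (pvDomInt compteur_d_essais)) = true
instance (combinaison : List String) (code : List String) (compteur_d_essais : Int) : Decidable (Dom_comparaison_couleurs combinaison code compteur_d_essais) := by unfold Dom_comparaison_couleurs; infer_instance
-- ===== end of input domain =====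

-- B replaces A's in-place sentinel-mutation scan (nested loops with repeated .count calls) by two
-- counting passes and a sum of per-color minima; A mutates `combinaison` in place — the equivalence
-- proved here is about the RETURN value only (A returns the pre-saved copy of its argument).


-- ===== PORT A =====
-- `del combinaison[i]; combinaison.insert(i, "x")`; i < comb.length throughout (the length is
-- preserved), so pop? is `some` and the getD default is never used (exact).
def pvDelIns (comb : List String) (i : Nat) : List String :=
  PySem.List.insert (((PySem.List.pop? comb (i : Int)).getD ("", comb)).2) (i : Int) "x"

-- the inner `for j, letter in enumerate(code)` loop (j is unused by the body)
def pvInnerA (code : List String) (element : String) (i : Nat) (comb : List String) : List String :=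
  code.foldl (fun cb letter =>
    if PySem.List.count cb element > PySem.List.count code letter then
      if element == letter then pvDelIns cb i else cb
    else cb) comb

def comparaison_couleurs (combinaison : List String) (code : List String) (compteur_d_essais : Int) : Int × Int × List String :=
  let sauvegarde_combinaison := ([] : List String) ++ combinaison
  -- `for i, element in enumerate(combinaison)` over the live (mutated) list: an index loop; the
  -- list length never changes (each del is immediately followed by an insert), so the original
  -- length is the number of iterations and every index access is in range (getD exact).
  let r := (List.range combinaison.length).foldl (fun (s : Int × List String) (i : Nat) =>
    let element := PySem.List.pyGetD s.2 (i : Int) ""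
    let cb := pvInnerA code element i s.2
    let bonnes := if PySem.List.pyGetD cb (i : Int) "" ∈ code then s.1 + 1 else s.1
    (bonnes, cb)) ((0 : Int), combinaison)
  (r.1, compteur_d_essais + 1, sauvegarde_combinaison)

-- ===== PORT B =====
def comparaison_couleurs_alt (combinaison : List String) (code : List String) (compteur_d_essais : Int) : Int × Int × List String :=
  let guess_counts := combinaison.foldl (fun (d : PySem.Dict String Int) c => d.insert c (d.getD c 0 + 1)) PySem.Dict.empty
  let code_counts := code.foldl (fun (d : PySem.Dict String Int) c => d.insert c (d.getD c 0 + 1)) PySem.Dict.empty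
  let bonnes_couleurs := code_counts.items.foldl (fun (b : Int) p => b + min p.2 (guess_counts.getD p.1 0)) 0
  (bonnes_couleurs, compteur_d_essais + 1, ([] : List String) ++ combinaison)

-- ===== PRECONDITION & SPEC =====
-- When the sentinel "x" occurs in code and some color has more occurrences in combinaison than in
-- code, A overwrites the excess slots with "x", which then itself matches the code, so A returns
-- the uncapped count of guess elements whose color is in code; B returns the intended Mastermind
-- count, the sum over colors of min(guess count, code count).
def D_comparaison_couleurs (combinaison : List String) (code : List String) (compteur_d_essais : Int) : Prop :=
  "x" ∈ code ∧ ∃ c ∈ code, code.count c < combinaison.count c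
instance (combinaison : List String) (code : List String) (compteur_d_essais : Int) : Decidable (D_comparaison_couleurs combinaison code compteur_d_essais) := by unfold D_comparaison_couleurs; infer_instance

def Spec_comparaison_couleurs (combinaison : List String) (code : List String) (compteur_d_essais : Int) (out : Int × Int × List String) : Prop := ¬ D_comparaison_couleurs combinaison code compteur_d_essais → out = comparaison_couleurs_alt combinaison code compteur_d_essais
instance (combinaison : List String) (code : List String) (compteur_d_essais : Int) (out : Int × Int × List String) : Decidable (Spec_comparaison_couleurs combinaison code compteur_d_essais out) := by unfold Spec_comparaison_couleurs; infer_instance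

def pvDiffWitness_comparaison_couleurs : List String × List String × Int := (["r", "r"], ["r", "x"], 0)
def pvDiffWitnessOut_comparaison_couleurs : (Int × Int × List String) × (Int × Int × List String) :=
  ((2, 1, ["r", "r"]), (1, 1, ["r", "r"]))

-- ===== CLAIM (what is proved, stated in full; the proofs are below) =====
def Claim_unchanged_comparaison_couleurs : Prop := ∀ (combinaison : List String) (code : List String) (compteur_d_essais : Int), Dom_comparaison_couleurs combinaison code compteur_d_essais → Spec_comparaison_couleurs combinaison code compteur_d_essais (comparaison_couleurs combinaison code compteur_d_essais)
def Claim_changed_comparaison_couleurs : Prop := Dom_comparaison_couleurs (pvDiffWitness_comparaison_couleurs.1) (pvDiffWitness_comparaison_couleurs.2.1) (pvDiffWitness_comparaison_couleurs.2.2) ∧ D_comparaison_couleurs (pvDiffWitness_comparaison_couleurs.1) (pvDiffWitness_comparaison_couleurs.2.1) (pvDiffWitness_comparaison_couleurs.2.2) ∧ comparaison_couleurs (pvDiffWitness_comparaison_couleurs.1) (pvDiffWitness_comparaison_couleurs.2.1) (pvDiffWitness_comparaison_couleurs.2.2) = pvDiffWitnessOut_comparaison_couleurs.1 ∧ comparaison_couleurs_alt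 (pvDiffWitness_comparaison_couleurs.1) (pvDiffWitness_comparaison_couleurs.2.1) (pvDiffWitness_comparaison_couleurs.2.2) = pvDiffWitnessOut_comparaison_couleurs.2 ∧ pvDiffWitnessOut_comparaison_couleurs.1 ≠ pvDiffWitnessOut_comparaison_couleurs.2
def Claim_exact_comparaison_couleurs : Prop := ∀ (combinaison : List String) (code : List String) (compteur_d_essais : Int), Dom_comparaison_couleurs combinaison code compteur_d_essais → D_comparaison_couleurs combinaison code compteur_d_essais → comparaison_couleurs combinaison code compteur_d_essais ≠ comparaison_couleurs_alt combinaison code compteur_d_essais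

-- ===== LEMMAS AND PROOFS =====
theorem pvSetSelf (l : List String) (i : Nat) (h : i < l.length) (hv : l[i] = "x") : l.set i "x" = l := by
  apply List.ext_getElem (by simp)
  intro n h1 h2
  rw [List.getElem_set]
  split <;> simp_all

theorem pvDelIns_eq_set (cb : List String) (i : Nat) (h : i < cb.length) :
    pvDelIns cb i = cb.set i "x" := by
  unfold pvDelIns
  rw [PySem.List.pop?_natCast cb i h]
  simp only [Option.getD_some]
  rw [PySem.List.insert_natCast _ i _ (by rw [List.length_eraseIdx]; split <;> omega)]
  rw [List.set_eq_take_append_cons_drop, if_pos h, List.eraseIdx_eq_take_drop_succ]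
  rw [List.take_append_of_le_length (by simp [List.length_take]; omega), List.take_take]
  simp
  rw [List.drop_append_of_le_length (by simp [List.length_take]; omega)]
  simp

theorem pvInner_fix (code : List String) (e : String) (i : Nat) :
    ∀ (letters cb : List String) (h : i < cb.length), cb[i]'h = "x" →
      letters.foldl (fun cb letter =>
        if PySem.List.count cb e > PySem.List.count code letter then
          if e == letter then pvDelIns cb i else cb
        else cb) cb = cb := by
  intro letters
  induction letters with
  | nil => intro cb h hv; rfl
  | cons l rest ih =>
    intro cb h hv
    have hstep : (if PySem.List.count cb e > PySem.List.count code l then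
          if e == l then pvDelIns cb i else cb else cb) = cb := by
      split
      · split
        · rw [pvDelIns_eq_set cb i h]; exact pvSetSelf cb i h hv
        · rfl
      · rfl
    rw [List.foldl_cons, hstep, ih cb h hv]

theorem pvInner_gen (code : List String) (e : String) (i : Nat) :
    ∀ (letters cb : List String), i < cb.length →
      letters.foldl (fun cb letter =>
        if PySem.List.count cb e > PySem.List.count code letter then
          if e == letter then pvDelIns cb i else cb
        else cb) cb =
      if e ∈ letters ∧ code.count e < cb.count e then cb.set i "x" else cb := by
  intro letters
  induction letters with
  | nil => intro cb h; simp
  | cons l rest ih =>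
    intro cb h
    rw [List.foldl_cons]
    by_cases hel : e = l
    · subst hel
      by_cases hc : List.count e code < List.count e cb
      · have : (if PySem.List.count cb e > PySem.List.count code e then
            if e == e then pvDelIns cb i else cb else cb) = cb.set i "x" := by
          rw [if_pos (by simp [PySem.List.count_eq]; omega), if_pos (by simp), pvDelIns_eq_set cb i h]
        rw [this, pvInner_fix code e i rest _ (by simpa using h) (by simp)]
        rw [if_pos ⟨by simp, by simpa [List.count] using hc⟩]
      · have : (if PySem.List.count cb e > PySem.List.count code e then
            if e == e then pvDelIns cb i else cb else cb) = cb := by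
          rw [if_neg (by simp [PySem.List.count_eq]; omega)]
        rw [this, ih cb h]
        have hrhs : ¬ (e ∈ e :: rest ∧ code.count e < cb.count e) := by
          simp [List.count] at hc ⊢; omega
        rw [if_neg hrhs]
        split
        · rename_i hcond; exact absurd hcond.2 (by simp only [List.count] at hc ⊢; omega)
        · rfl
    · have : (if PySem.List.count cb e > PySem.List.count code l then
          if e == l then pvDelIns cb i else cb else cb) = cb := by
        split
        · rw [if_neg (by simpa using hel)]
        · rfl
      rw [this, ih cb h]
      exact if_congr (by simp [hel]) rfl rfl

theorem pvInnerA_spec (code : List String) (e : String) (i : Nat) (cb : List String) (h : i < cb.length) :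
    pvInnerA code e i cb = if e ∈ code ∧ code.count e < cb.count e then cb.set i "x" else cb := by
  unfold pvInnerA
  exact pvInner_gen code e i code cb h

theorem pvSumUpdate (S : List String) (hnd : S.Nodup) (f g : String → Int) (h : String) (δ : Int)
    (hne : ∀ c, c ≠ h → f c = g c) (hh : f h = g h + δ) :
    (S.map f).sum = (S.map g).sum + (if h ∈ S then δ else 0) := by
  induction S with
  | nil => simp
  | cons a S' ih =>
    have hnd' : S'.Nodup := (List.nodup_cons.mp hnd).2
    have hna : a ∉ S' := (List.nodup_cons.mp hnd).1
    by_cases hah : a = h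
    · subst hah
      have hmap : S'.map f = S'.map g := by
        apply List.map_congr_left
        intro c hc
        exact hne c (fun hch => hna (hch ▸ hc))
      simp only [List.map_cons, List.sum_cons, hmap, hh, List.mem_cons]
      simp
      ring
    · simp only [List.map_cons, List.sum_cons, ih hnd', hne a hah, List.mem_cons]
      simp [Ne.symm hah]
      ring
  
theorem pvMemSum (K : List String) : ∀ (L : List String),
    (L.map (fun e => if e ∈ K then (1 : Int) else 0)).sum =
      ((PySem.Set.ofList K).map (fun c => (L.count c : Int))).sum := by
  intro L
  induction L with
  | nil => simp
  | cons h t ih =>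
    simp only [List.map_cons, List.sum_cons, ih]
    rw [pvSumUpdate (PySem.Set.ofList K) (PySem.Set.nodup_ofList K)
      (fun c => ((h :: t).count c : Int)) (fun c => (t.count c : Int)) h 1
      (by intro c hch; simp [List.count_cons, Ne.symm hch])
      (by push_cast [List.count_cons]; simp)]
    simp only [PySem.Set.mem_ofList]
    split_ifs <;> omega

def pvGood (K : List String) : List String → Int
  | [] => 0
  | h :: t => (if h ∈ K ∧ (h :: t).count h ≤ K.count h then 1 else 0) + pvGood K t

theorem pvGood_eq_minsum (K : List String) : ∀ (L : List String),
    pvGood K L = ((PySem.Set.ofList K).map (fun c => min (K.count c : Int) (L.count c))).sum := by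
  intro L
  induction L with
  | nil => simp [pvGood]
  | cons h t ih =>
    simp only [pvGood, ih]
    rw [pvSumUpdate (PySem.Set.ofList K) (PySem.Set.nodup_ofList K)
      (fun c => min (K.count c : Int) (((h :: t).count c : Int))) (fun c => min (K.count c : Int) ((t.count c : Int))) h
      (if (t.count h : Int) < (K.count h : Int) then 1 else 0)
      (by intro c hch; simp [List.count_cons, Ne.symm hch])
      (by simp only [List.count_cons, BEq.rfl, if_true]; push_cast; split_ifs <;> omega)]
    simp only [PySem.Set.mem_ofList, List.count_cons, BEq.rfl, if_true]
    push_cast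
    split_ifs <;> simp_all <;> omega

def pvMark (K : List String) (rest : List String) : List String → List String
  | [] => []
  | h :: t => (if h ∈ K ∧ K.count h < (h :: (t ++ rest)).count h then "x" else h) :: pvMark K rest t

theorem pvMark_length (K rest : List String) : ∀ pre, (pvMark K rest pre).length = pre.length := by
  intro pre
  induction pre with
  | nil => rfl
  | cons h t ih => simp [pvMark, ih]

theorem pvMark_snoc (K rest pre : List String) (a : String) :
    pvMark K (a :: rest) pre ++ [if a ∈ K ∧ K.count a < (a :: rest).count a then "x" else a] =
      pvMark K rest (pre ++ [a]) := by
  induction pre with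
  | nil => simp [pvMark]
  | cons h t ih =>
    simp only [pvMark, List.cons_append]
    rw [ih]
    have h2 : t ++ a :: rest = (t ++ [a]) ++ rest := by simp
    rw [h2]

theorem pvMark_count (K : List String) (hx : "x" ∉ K) (rest : List String) (e : String) (he : e ∈ K) :
    ∀ pre, (pvMark K rest pre).count e + min (K.count e) (rest.count e)
      = min (K.count e) (pre.count e + rest.count e) := by
  have hex : e ≠ "x" := fun hh => hx (hh ▸ he)
  intro pre
  induction pre with
  | nil => simp [pvMark]
  | cons h t ih =>
    by_cases hhe : h = e
    · subst hhe
      simp only [pvMark, List.count_cons, List.count_append, BEq.rfl, if_true, he, true_and]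
      split_ifs <;> first | omega | simp_all
    · simp only [pvMark, List.count_cons, List.count_append]
      have hb1 : (h == e) = false := beq_eq_false_iff_ne.mpr hhe
      have hb2 : ("x" == e) = false := beq_eq_false_iff_ne.mpr (Ne.symm hex)
      split_ifs <;> first | omega | simp_all

theorem pvGetD_append (mp : List String) (y : String) (ys : List String) :
    PySem.List.pyGetD (mp ++ y :: ys) (mp.length : Int) "" = y := by
  rw [PySem.List.pyGetD_natCast]
  simp [List.getD_eq_getElem?_getD]

theorem pvSetMid (mp r : List String) (e v : String) : (mp ++ e :: r).set mp.length v = mp ++ v :: r := by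
  rw [List.set_append]; simp

-- the body of A's outer loop, named for the proofs
def pvStep (K : List String) (s : Int × List String) (i : Nat) : Int × List String :=
  let element := PySem.List.pyGetD s.2 (i : Int) ""
  let cb := pvInnerA K element i s.2
  let bonnes := if PySem.List.pyGetD cb (i : Int) "" ∈ K then s.1 + 1 else s.1
  (bonnes, cb)

theorem pvOuterY (K : List String) (hx : "x" ∉ K) :
    ∀ (rest pre : List String) (b : Int),
      ((List.range' pre.length rest.length).foldl (pvStep K) (b, pvMark K rest pre ++ rest)).1
        = b + pvGood K rest := by
  intro rest
  induction rest with
  | nil => intro pre b; simp [pvGood]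
  | cons e rest' ih =>
    intro pre b
    rw [List.length_cons, List.range'_succ, List.foldl_cons]
    have hlen : (pvMark K (e :: rest') pre).length = pre.length := pvMark_length K _ pre
    set mp := pvMark K (e :: rest') pre with hmp
    have hget : PySem.List.pyGetD (mp ++ e :: rest') (pre.length : Int) "" = e := by
      rw [← hlen]; exact pvGetD_append mp e rest'
    have hinner : pvInnerA K e pre.length (mp ++ e :: rest') =
        mp ++ (if e ∈ K ∧ K.count e < (e :: rest').count e then "x" else e) :: rest' := by
      rw [pvInnerA_spec K e pre.length _ (by simp only [List.length_append, hlen, List.length_cons]; omega)]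
      by_cases hek : e ∈ K
      · have hcnt := pvMark_count K hx (e :: rest') e hek pre
        rw [← hmp] at hcnt
        have hceq : (mp ++ e :: rest').count e = mp.count e + (e :: rest').count e := by
          simp [List.count_append]
        by_cases hlt : K.count e < (e :: rest').count e
        · rw [if_pos ⟨hek, by omega⟩, if_pos ⟨hek, hlt⟩, ← hlen, pvSetMid]
        · rw [if_neg (by push_neg; intro _; omega), if_neg (by push_neg; intro _; omega)]
      · rw [if_neg (by simp [hek]), if_neg (by simp [hek])]
    have hget2 : PySem.List.pyGetD (mp ++ (if e ∈ K ∧ K.count e < (e :: rest').count e then "x" else e) :: rest') (pre.length : Int) ""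
        = (if e ∈ K ∧ K.count e < (e :: rest').count e then "x" else e) := by
      rw [← hlen]; exact pvGetD_append mp _ rest'
    have hstep : pvStep K (b, mp ++ e :: rest') pre.length =
        (b + (if e ∈ K ∧ (e :: rest').count e ≤ K.count e then 1 else 0),
         pvMark K rest' (pre ++ [e]) ++ rest') := by
      simp only [pvStep, hget, hinner]
      rw [hget2]
      refine Prod.ext ?_ ?_
      · dsimp only
        split_ifs <;> first | rfl | omega | simp_all
      · dsimp only
        rw [← pvMark_snoc, hmp]
        simp
    rw [hstep, show pre.length + 1 = (pre ++ [e]).length by simp, ih (pre ++ [e])]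
    simp only [pvGood]
    ring

theorem pvOuterX (K : List String) (hx : "x" ∈ K) :
    ∀ (rest mp : List String) (b : Int),
      ((List.range' mp.length rest.length).foldl (pvStep K) (b, mp ++ rest)).1
        = b + (rest.map (fun e => if e ∈ K then (1 : Int) else 0)).sum := by
  intro rest
  induction rest with
  | nil => intro mp b; simp
  | cons e rest' ih =>
    intro mp b
    rw [List.length_cons, List.range'_succ, List.foldl_cons]
    have hget : PySem.List.pyGetD (mp ++ e :: rest') (mp.length : Int) "" = e :=
      pvGetD_append mp e rest'
    obtain ⟨m, hm, hmem⟩ : ∃ m, pvInnerA K e mp.length (mp ++ e :: rest') = mp ++ m :: rest' ∧ ((m ∈ K) ↔ (e ∈ K)) := by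
      rw [pvInnerA_spec K e mp.length _ (by simp only [List.length_append, List.length_cons]; omega)]
      split_ifs with hc
      · exact ⟨"x", pvSetMid mp rest' e "x", by simp [hx, hc.1]⟩
      · exact ⟨e, rfl, Iff.rfl⟩
    have hstep : pvStep K (b, mp ++ e :: rest') mp.length =
        (b + (if e ∈ K then 1 else 0), mp ++ m :: rest') := by
      simp only [pvStep, hget, hm]
      rw [pvGetD_append]
      refine Prod.ext ?_ rfl
      dsimp only
      split_ifs <;> simp_all
    rw [hstep, show mp ++ m :: rest' = (mp ++ [m]) ++ rest' by simp,
        show mp.length + 1 = (mp ++ [m]).length by simp, ih (mp ++ [m])]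
    simp only [List.map_cons, List.sum_cons]
    ring

theorem pvAltVal (L K : List String) (cnt : Int) :
    comparaison_couleurs_alt L K cnt =
      (((PySem.Set.ofList K).map (fun c => min (K.count c : Int) (L.count c))).sum, cnt + 1, L) := by
  simp only [comparaison_couleurs_alt, PySem.Dict.foldl_insert_getD_add_one_eq_counter,
      PySem.Dict.items_counter, PySem.List.foldl_add]
  simp [PySem.Dict.getD_counter, List.map_map, Function.comp_def]

theorem pvAVal_not_mem (L K : List String) (cnt : Int) (hx : "x" ∉ K) :
    comparaison_couleurs L K cnt = (pvGood K L, cnt + 1, L) := by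
  have h0 : comparaison_couleurs L K cnt
      = (((List.range L.length).foldl (pvStep K) ((0 : Int), L)).1, cnt + 1, ([] : List String) ++ L) := rfl
  have h1 := pvOuterY K hx L [] 0
  simp only [List.length_nil] at h1
  rw [show pvMark K L [] = [] from rfl, List.nil_append] at h1
  rw [h0, List.range_eq_range', h1]
  simp

theorem pvAVal_mem (L K : List String) (cnt : Int) (hx : "x" ∈ K) :
    comparaison_couleurs L K cnt = ((L.map (fun e => if e ∈ K then (1 : Int) else 0)).sum, cnt + 1, L) := by
  have h0 : comparaison_couleurs L K cnt
      = (((List.range L.length).foldl (pvStep K) ((0 : Int), L)).1, cnt + 1, ([] : List String) ++ L) := rfl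
  have h1 := pvOuterX K hx L [] 0
  simp only [List.length_nil, List.nil_append] at h1
  rw [h0, List.range_eq_range', h1]
  simp

-- ===== VERDICT (by name: the statement is the Claim_ definition above) =====
theorem comparaison_couleurs_spec : Claim_unchanged_comparaison_couleurs := by
  unfold Claim_unchanged_comparaison_couleurs
  intro L K cnt _dom
  unfold Spec_comparaison_couleurs
  intro hD
  unfold D_comparaison_couleurs at hD
  rw [pvAltVal]
  by_cases hx : "x" ∈ K
  · have hall : ∀ c ∈ K, L.count c ≤ K.count c := by
      intro c hc
      by_contra hgt
      exact hD ⟨hx, c, hc, by omega⟩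
    rw [pvAVal_mem L K cnt hx, pvMemSum K L]
    have : ((PySem.Set.ofList K).map (fun c => (L.count c : Int))).sum
        = ((PySem.Set.ofList K).map (fun c => min (K.count c : Int) (L.count c))).sum := by
      apply congrArg List.sum
      apply List.map_congr_left
      intro c hc
      have := hall c ((PySem.Set.mem_ofList K c).mp hc)
      omega
    rw [this]
  · rw [pvAVal_not_mem L K cnt hx, pvGood_eq_minsum]

theorem comparaison_couleurs_changed : Claim_changed_comparaison_couleurs := by
  unfold Claim_changed_comparaison_couleurs; decide

theorem comparaison_couleurs_tight : Claim_exact_comparaison_couleurs := by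
  unfold Claim_exact_comparaison_couleurs
  intro L K cnt _dom hD
  unfold D_comparaison_couleurs at hD
  obtain ⟨hx, c, hcK, hlt⟩ := hD
  rw [pvAVal_mem L K cnt hx, pvAltVal, pvMemSum K L]
  intro heq
  simp only [Prod.mk.injEq] at heq
  obtain ⟨h1, -⟩ := heq
  have h2 : ((PySem.Set.ofList K).map (fun c => min (K.count c : Int) (L.count c))).sum
      < ((PySem.Set.ofList K).map (fun c => (L.count c : Int))).sum := by
    apply List.sum_lt_sum
    · intro i _
      exact min_le_right _ _
    · exact ⟨c, (PySem.Set.mem_ofList K c).mpr hcK, by omega⟩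
  omega
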